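-- pv_equiv track=rewrite | github.com/MegabytePhreak/crcgen | crcgen/crcgen.py | build_crc_matrices
-- ===== SOURCE A (Python) =====
-- from typing import Iterator, List, Sequence, Tuple
--
-- def lfsr_shift_bit(
--     poly: Sequence[int], cur_state: Sequence[int], data: int
-- ) -> List[int]:
--
--     next_state = list(cur_state)
--     state_msb = next_state[-1]
--
--     for j in range(len(cur_state) - 1, 0, -1):
--         if poly[j] != 0:
--             next_state[j] = next_state[j - 1] ^ state_msb ^ data
--         else:
--             next_state[j] = next_state[j - 1]
--     next_state[0] = state_msb ^ data
--
--     return next_state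
--
-- def lfsr_shift_serial(
--     poly: Sequence[int], cur_state: Sequence[int], data: Sequence[int]
-- ) -> Sequence[int]:
--
--     next_state = list(cur_state)
--
--     for dbit in data:
--         next_state = lfsr_shift_bit(poly, next_state, dbit)
--
--     return next_state
--
-- def build_crc_matrices(
--     poly: Sequence[int], dwidth: int, reflect_input: bool = False
-- ) -> Tuple[Sequence[Sequence[int]], Sequence[Sequence[int]]]:
--
--     propagate_state_bits = []
--     for i in range(len(poly)):
--         nulldata = [0] * dwidth
--         state = [0] * len(poly)
--         state[i] = 1
--         propagate_state_bits.append(lfsr_shift_serial(poly, state, nulldata))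
--
--     propagate_data_bits = []
--     data_range = range(dwidth)
--     # We will naturally reflect the input relative to the normal convention
--     # for CRCs by going 0-up, reverse the data if not desired
--     if not reflect_input:
--         data_range = reversed(data_range)
--     for i in data_range:
--         data = [0] * dwidth
--         data[i] = 1
--         nullstate = [0] * len(poly)
--         propagate_data_bits.append(lfsr_shift_serial(poly, nullstate, data))
--
--     return (propagate_state_bits, propagate_data_bits)
-- ===== SOURCE B (Python) =====
-- from typing import Sequence, Tuple
--
-- def build_crc_matrices(
--     poly: Sequence[int], dwidth: int, reflect_input: bool = False
-- ) -> Tuple[Sequence[Sequence[int]], Sequence[Sequence[int]]]: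
--     # O(n*d): every propagation vector is one more zero-data shift of the
--     # previous one, so compute the shift orbit of the taps vector once and
--     # read both matrices off it.
--     n = len(poly)
--     d = max(dwidth, 0)
--
--     # State after injecting a single 1 (from data or from the MSB feedback).
--     taps = [1 if j == 0 else (1 if p != 0 else 0) for j, p in enumerate(poly)]
--
--     # us[k] = taps shifted k times with zero data.
--     us = []
--     u = taps
--     for _ in range(d):
--         us.append(u)
--         msb = u[-1]
--         u = [msb] + [x ^ msb if p != 0 else x for p, x in zip(poly[1:], u[:-1])]
--
--     # Shifting the unit vector e_i d times: it slides to e_{i+d} while it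
--     # stays inside the register, afterwards it follows the taps orbit.
--     state_rows = []
--     for i in range(n):
--         k = i + d
--         if k < n:
--             state_rows.append([1 if j == k else 0 for j in range(n)])
--         else:
--             state_rows.append(us[k - n])
--
--     # Data bit i is injected at step i and then shifted d-1-i more times.
--     data_rows = list(reversed(us)) if reflect_input else us
--
--     return (state_rows, data_rows)
-- ===== Notes on version B (the rewrite author's own statement) =====
-- stated objective: faster
-- what changed: Instead of running a full dwidth-step serial LFSR simulation separately for each of the n state basis vectors and each of the dwidth data basis vectors, B computes the zero-data shift orbit of the taps vector once (each row is one more shift of the previous row) and reads both matrices off that orbit, unit vectors merely sliding while inside the register.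
import Mathlib
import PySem

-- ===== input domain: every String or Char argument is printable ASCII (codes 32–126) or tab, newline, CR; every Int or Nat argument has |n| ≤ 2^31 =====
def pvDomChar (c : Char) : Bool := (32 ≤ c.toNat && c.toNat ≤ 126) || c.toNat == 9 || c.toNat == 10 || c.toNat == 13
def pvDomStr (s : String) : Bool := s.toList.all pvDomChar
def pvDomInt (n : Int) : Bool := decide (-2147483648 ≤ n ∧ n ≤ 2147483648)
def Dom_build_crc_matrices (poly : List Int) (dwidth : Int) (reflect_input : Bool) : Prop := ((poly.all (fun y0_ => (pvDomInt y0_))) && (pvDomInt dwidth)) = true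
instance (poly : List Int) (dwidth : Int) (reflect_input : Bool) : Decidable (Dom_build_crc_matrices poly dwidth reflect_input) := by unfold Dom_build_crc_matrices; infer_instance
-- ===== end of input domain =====

-- B replaces A's per-basis-vector serial LFSR simulations by one incremental
-- zero-data shift orbit of the taps vector from which both matrices are read off
-- (objective: faster).

-- ===== PORT A =====
-- lfsr_shift_bit: next_state[-1] is an IndexError on an empty state (none branch,
-- unreachable under Pre_; we return cur_state there).  Inside the loop j runs over
-- range(len(cur_state)-1, 0, -1), so 1 <= j < len(cur_state): the poly[j] and
-- next_state[j-1] reads and next_state[j] writes are in range at every call the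
-- admitted inputs reach (poly and cur_state always have equal length), so the
-- total forms pyGetD/pySetD are exact there.
def lfsr_shift_bit (poly : List Int) (cur_state : List Int) (data : Int) : List Int :=
  match PySem.List.pyGet? cur_state (-1) with
  | none => cur_state
  | some state_msb =>
    let ns := (PySem.List.pyRange ((cur_state.length : Int) - 1) 0 (-1)).foldl
      (fun ns j =>
        if PySem.List.pyGetD poly j 0 ≠ 0 then
          PySem.List.pySetD ns j
            (PySem.Int.bxor (PySem.Int.bxor (PySem.List.pyGetD ns (j - 1) 0) state_msb) data)
        else
          PySem.List.pySetD ns j (PySem.List.pyGetD ns (j - 1) 0))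
      cur_state
    PySem.List.pySetD ns 0 (PySem.Int.bxor state_msb data)

def lfsr_shift_serial (poly : List Int) (cur_state : List Int) (data : List Int) : List Int :=
  data.foldl (fun ns dbit => lfsr_shift_bit poly ns dbit) cur_state

def build_crc_matrices (poly : List Int) (dwidth : Int) (reflect_input : Bool) : List (List Int) × List (List Int) :=
  let propagate_state_bits := (List.range poly.length).foldl
    (fun acc i =>
      let nulldata : List Int := List.replicate dwidth.toNat 0
      let state := (List.replicate poly.length (0 : Int)).set i 1
      acc ++ [lfsr_shift_serial poly state nulldata]) []
  let data_range :=
    if !reflect_input then (PySem.List.pyRange 0 dwidth 1).reverse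
    else PySem.List.pyRange 0 dwidth 1
  let propagate_data_bits := data_range.foldl
    (fun acc i =>
      let data := PySem.List.pySetD (List.replicate dwidth.toNat (0 : Int)) i 1
      let nullstate : List Int := List.replicate poly.length (0 : Int)
      acc ++ [lfsr_shift_serial poly nullstate data]) []
  (propagate_state_bits, propagate_data_bits)

-- ===== PORT B =====
-- one zero-data shift of u: u[-1] is an IndexError on an empty u (Source B raises there,
-- exactly where A does: poly=[] with dwidth>0, outside Pre_); on the admitted inputs
-- u is never empty, so the total pyGetD form is exact there; u[:-1] is slice to -1
def altStep (poly : List Int) (u : List Int) : List Int :=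
  let msb := PySem.List.pyGetD u (-1) 0
  msb :: (((poly.drop 1).zip (PySem.List.slice u none (some (-1)))).map
    (fun px => if px.1 ≠ 0 then PySem.Int.bxor px.2 msb else px.2))

def build_crc_matrices_alt (poly : List Int) (dwidth : Int) (reflect_input : Bool) : List (List Int) × List (List Int) :=
  let n := poly.length
  let d := (max dwidth 0).toNat
  -- [1 if j == 0 else (1 if p != 0 else 0) for j, p in enumerate(poly)]
  let taps : List Int := poly.zipIdx.map
    (fun pj => if pj.2 = 0 then (1 : Int) else if pj.1 ≠ 0 then 1 else 0)
  let us := ((List.range d).foldl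
    (fun (st : List (List Int) × List Int) _ => (st.1 ++ [st.2], altStep poly st.2))
    ([], taps)).1
  let state_rows := (List.range n).map
    (fun i =>
      let k := i + d
      if k < n then (List.range n).map (fun j => if j = k then (1 : Int) else 0)
      else us.getD (k - n) [])
  let data_rows := if reflect_input then us.reverse else us
  (state_rows, data_rows)

-- ===== PRECONDITION & SPEC =====
-- Pre_ excludes exactly the inputs on which A raises: poly = [] with dwidth > 0
-- (lfsr_shift_bit reads next_state[-1] of an empty register: IndexError; B raises
-- IndexError there too).
def Pre_build_crc_matrices (poly : List Int) (dwidth : Int) (reflect_input : Bool) : Prop :=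
  poly ≠ [] ∨ dwidth ≤ 0
instance (poly : List Int) (dwidth : Int) (reflect_input : Bool) : Decidable (Pre_build_crc_matrices poly dwidth reflect_input) := by unfold Pre_build_crc_matrices; infer_instance

def pvWitness_build_crc_matrices : List Int × Int × Bool := ([1, 0, 1], 4, false)

def Spec_build_crc_matrices (poly : List Int) (dwidth : Int) (reflect_input : Bool) (out : List (List Int) × List (List Int)) : Prop := out = build_crc_matrices_alt poly dwidth reflect_input
instance (poly : List Int) (dwidth : Int) (reflect_input : Bool) (out : List (List Int) × List (List Int)) : Decidable (Spec_build_crc_matrices poly dwidth reflect_input out) := by unfold Spec_build_crc_matrices; infer_instance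

-- ===== CLAIM (what is proved, stated in full; the proofs are below) =====
def Claim_equal_build_crc_matrices : Prop := ∀ (poly : List Int) (dwidth : Int) (reflect_input : Bool), Dom_build_crc_matrices poly dwidth reflect_input → Pre_build_crc_matrices poly dwidth reflect_input → Spec_build_crc_matrices poly dwidth reflect_input (build_crc_matrices poly dwidth reflect_input)

-- ===== LEMMAS AND PROOFS =====

def gstep (poly : List Int) (msb data : Int) : List Int → Int → List Int := fun ns j =>
  if PySem.List.pyGetD poly j 0 ≠ 0 then
    PySem.List.pySetD ns j (PySem.Int.bxor (PySem.Int.bxor (PySem.List.pyGetD ns (j - 1) 0) msb) data)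
  else
    PySem.List.pySetD ns j (PySem.List.pyGetD ns (j - 1) 0)

theorem length_foldl_gstep (poly : List Int) (msb data : Int) (r : List Int) (ns : List Int) :
    ((r.foldl (gstep poly msb data) ns)).length = ns.length := by
  induction r generalizing ns with
  | nil => rfl
  | cons j r ih =>
    simp only [List.foldl_cons, ih]
    unfold gstep; split <;> simp [PySem.List.length_pySetD]

theorem foldl_gstep_set_high (poly : List Int) (msb data : Int) (m M : Nat) (x : Int) :
    ∀ ns : List Int, m < M →
    (PySem.List.pyRange (m : Int) 0 (-1)).foldl (gstep poly msb data) (ns.set M x)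
      = ((PySem.List.pyRange (m : Int) 0 (-1)).foldl (gstep poly msb data) ns).set M x := by
  induction m with
  | zero => intro ns h; simp [PySem.List.pyRange_neg_one_eq_nil]
  | succ m ih =>
    intro ns h
    have hcast : ((m+1 : Nat) : Int) = (m : Int) + 1 := by push_cast; ring
    have hc : PySem.List.pyRange ((m+1 : Nat) : Int) 0 (-1)
        = ((m+1 : Nat) : Int) :: PySem.List.pyRange (((m+1 : Nat) : Int) - 1) 0 (-1) := by
      exact PySem.List.pyRange_neg_one_cons (by push_cast; omega)
    have hm1 : ((m+1 : Nat) : Int) - 1 = (m : Int) := by push_cast; ring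
    rw [hc, hm1]
    simp only [List.foldl_cons]
    have hg : gstep poly msb data (ns.set M x) ((m+1 : Nat) : Int)
        = (gstep poly msb data ns ((m+1 : Nat) : Int)).set M x := by
      unfold gstep
      have hget : PySem.List.pyGetD (ns.set M x) (((m+1 : Nat) : Int) - 1) 0
          = PySem.List.pyGetD ns (((m+1 : Nat) : Int) - 1) 0 := by
        rw [hm1]
        simp [PySem.List.pyGetD_natCast, List.getElem?_set_ne (by omega : M ≠ m)]
      rw [hget]
      split <;>
      · rw [← hcast] at *
        simp only [PySem.List.pySetD_natCast]
        exact List.set_comm _ _ (by omega : M ≠ m + 1)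
    rw [hg]
    exact ih (gstep poly msb data ns ((m+1 : Nat) : Int)) (by omega)

def Fv (poly u : List Int) (msb data : Int) (jj : Nat) : Int :=
  if poly[jj]?.getD 0 ≠ 0 then PySem.Int.bxor (PySem.Int.bxor (u[jj-1]?.getD 0) msb) data
  else u[jj-1]?.getD 0

theorem foldl_gstep_getElem (poly u : List Int) (msb data : Int) (m : Nat) (hm : m < u.length) (jj : Nat) :
    ((PySem.List.pyRange (m : Int) 0 (-1)).foldl (gstep poly msb data) u)[jj]?
      = if jj = 0 ∨ m < jj then u[jj]? else some (Fv poly u msb data jj) := by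
  induction m with
  | zero =>
    simp [PySem.List.pyRange_neg_one_eq_nil]
  | succ m ih =>
    have hc : PySem.List.pyRange ((m+1 : Nat) : Int) 0 (-1)
        = ((m+1 : Nat) : Int) :: PySem.List.pyRange (((m+1 : Nat) : Int) - 1) 0 (-1) :=
      PySem.List.pyRange_neg_one_cons (by push_cast; omega)
    have hm1 : ((m+1 : Nat) : Int) - 1 = (m : Int) := by push_cast; ring
    rw [hc, hm1]
    simp only [List.foldl_cons]
    have hg : gstep poly msb data u ((m+1 : Nat) : Int) = u.set (m+1) (Fv poly u msb data (m+1)) := by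
      unfold gstep Fv
      have h1 : ((m+1 : Nat) : Int) - 1 = ((m : Nat) : Int) := hm1
      rw [h1]
      simp only [PySem.List.pyGetD_natCast, PySem.List.pySetD_natCast]
      split <;> split <;> simp_all [List.getD]
    rw [hg, foldl_gstep_set_high poly msb data m (m+1) _ u (by omega)]
    rw [List.getElem?_set]
    have hlen : ((PySem.List.pyRange (m : Int) 0 (-1)).foldl (gstep poly msb data) u).length = u.length :=
      length_foldl_gstep _ _ _ _ _
    by_cases hj : m + 1 = jj
    · subst hj
      simp [hlen, hm]
    · rw [if_neg hj, ih (by omega)]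
      by_cases h0 : jj = 0 ∨ m < jj
      · rcases h0 with h0 | h0
        · simp [h0]
        · have h2 : m + 1 < jj := by omega
          simp [h0, h2]
      · rw [if_neg h0, if_neg (by omega)]

def shiftSpec (poly : List Int) (u : List Int) (data : Int) : List Int :=
  PySem.Int.bxor (u.getLastD 0) data ::
    (((poly.drop 1).zip u.dropLast).map
      (fun px => if px.1 ≠ 0 then PySem.Int.bxor (PySem.Int.bxor px.2 (u.getLastD 0)) data else px.2))

theorem shift_bit_eq_shiftSpec (poly u : List Int) (data : Int)
    (hlen : u.length = poly.length) (hne : u ≠ []) :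
    lfsr_shift_bit poly u data = shiftSpec poly u data := by
  have hn : 0 < u.length := List.length_pos_of_ne_nil hne
  have hmsb : PySem.List.pyGet? u (-1) = some (u.getLastD 0) := by
    rw [PySem.List.pyGet?_neg_one, List.getLast?_eq_getLast_of_ne_nil hne]
    cases u with
    | nil => simp at hn
    | cons a t => simp [List.getLastD]
  unfold lfsr_shift_bit
  rw [hmsb]
  dsimp only
  set msb := u.getLastD 0 with hmsbdef
  have hrange : ((u.length : Int) - 1) = ((u.length - 1 : Nat) : Int) := by push_cast [hn]; omega
  rw [hrange]
  have hfold := foldl_gstep_getElem poly u msb data (u.length - 1) (by omega)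
  have hfoldlen := length_foldl_gstep poly msb data (PySem.List.pyRange ((u.length - 1 : Nat) : Int) 0 (-1)) u
  rw [show (fun (ns : List Int) (j : Int) =>
        if PySem.List.pyGetD poly j 0 ≠ 0 then
          PySem.List.pySetD ns j
            (PySem.Int.bxor (PySem.Int.bxor (PySem.List.pyGetD ns (j - 1) 0) msb) data)
        else
          PySem.List.pySetD ns j (PySem.List.pyGetD ns (j - 1) 0)) = gstep poly msb data from rfl]
  rw [PySem.List.pySetD_of_nonneg _ _ (by norm_num)]
  apply List.ext_getElem?
  intro jj
  rw [List.getElem?_set]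
  by_cases hj0 : jj = 0
  · subst hj0
    simp [hfoldlen, hn, shiftSpec, hmsbdef, List.getLastD_eq_getLast?]
    intro hcon
    have h := congrArg List.length hcon
    rw [length_foldl_gstep poly (u.getLast?.getD 0) data] at h
    simp only [List.length_nil] at h
    omega
  · rw [if_neg (by omega), hfold jj]
    obtain ⟨k, rfl⟩ : ∃ k, jj = k + 1 := ⟨jj - 1, by omega⟩
    by_cases hjn : k + 1 < u.length
    · rw [if_neg (by omega)]
      have hj1 : k < ((poly.drop 1).zip u.dropLast).length := by
        simp [List.length_zip, List.length_dropLast, hlen]; omega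
      unfold shiftSpec Fv
      simp [List.getElem?_eq_getElem, hj1, show k < u.length by omega, show k + 1 < poly.length by omega]
      refine ⟨poly[k+1]'(by omega), u[k]'(by omega), ?_, ?_⟩
      · rw [List.getElem?_eq_getElem (by simpa [List.drop_one] using hj1)]
        congr 1
        rw [List.getElem_zip]
        congr 1 <;> simp [List.getElem_tail, List.getElem_dropLast]
      · rw [hmsbdef, List.getLastD_eq_getLast?]
    · rw [if_pos (by omega)]
      rw [List.getElem?_eq_none (by omega)]
      symm
      apply List.getElem?_eq_none
      simp [shiftSpec, List.length_zip, List.length_dropLast, hlen]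
      omega

theorem altStep_eq_shiftSpec (poly u : List Int) : altStep poly u = shiftSpec poly u 0 := by
  simp [altStep, shiftSpec, PySem.List.pyGetD, PySem.List.pyGet?_neg_one, PySem.List.slice_to_neg_one, List.getLastD]
  cases u with
  | nil => simp
  | cons a t =>
    simp [List.getLast?_eq_getLast_of_ne_nil (by simp : (a :: t : List Int) ≠ [])]

-- notation for the proof layer
def Sp (poly : List Int) (u : List Int) : List Int := shiftSpec poly u 0
def zeros (n : Nat) : List Int := List.replicate n 0
def eVec (n k : Nat) : List Int := (List.range n).map (fun j => if j = k then (1 : Int) else 0)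
def tapsVec (poly : List Int) : List Int := 1 :: (poly.drop 1).map (fun p => if p ≠ 0 then 1 else 0)

theorem taps_port_eq (poly : List Int) (hn : poly ≠ []) :
    poly.zipIdx.map (fun pj => if pj.2 = 0 then (1 : Int) else if pj.1 ≠ 0 then 1 else 0)
      = tapsVec poly := by
  cases poly with
  | nil => exact absurd rfl hn
  | cons a t =>
    simp only [List.zipIdx_cons, List.map_cons, if_pos rfl, tapsVec, List.drop_one, List.tail_cons]
    congr 1
    apply List.ext_getElem
    · simp
    · intro i h1 h2
      simp [List.getElem_zipIdx]

theorem length_shiftSpec (poly u : List Int) (d : Int) (hlen : u.length = poly.length) (hn : 0 < poly.length) :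
    (shiftSpec poly u d).length = poly.length := by
  simp [shiftSpec, List.length_zip, List.length_dropLast, hlen]
  omega

theorem length_tapsVec (poly : List Int) (hn : 0 < poly.length) : (tapsVec poly).length = poly.length := by
  simp [tapsVec]; omega

theorem Sp_zeros (poly : List Int) (hn : 0 < poly.length) :
    Sp poly (zeros poly.length) = zeros poly.length := by
  unfold Sp shiftSpec zeros
  obtain ⟨m, hm⟩ : ∃ m, poly.length = m + 1 := ⟨poly.length - 1, by omega⟩
  rw [hm]
  have hdl : (List.replicate (m+1) (0:Int)).dropLast = List.replicate m 0 := by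
    simp [List.dropLast_replicate]
  have hlast : (List.replicate (m+1) (0:Int)).getLastD 0 = 0 := by
    simp [List.getLastD_eq_getLast?, List.getLast?_replicate]
  rw [hdl, hlast]
  have hz : ∀ px ∈ (poly.drop 1).zip (List.replicate m (0:Int)),
      (if px.1 ≠ 0 then PySem.Int.bxor (PySem.Int.bxor px.2 0) 0 else px.2) = (0:Int) := by
    intro px hpx
    have h2 : px.2 = 0 := List.eq_of_mem_replicate (List.of_mem_zip hpx).2
    rw [h2]; split <;> simp
  rw [List.map_congr_left hz, List.map_const']
  have hlz : ((poly.drop 1).zip (List.replicate m (0:Int))).length = m := by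
    simp [List.length_zip, hm]
  rw [hlz]
  simp [List.replicate_succ]

theorem getElem_eVec (n k i : Nat) (h : i < n) :
    (eVec n k)[i]'(by simp [eVec]; omega) = if i = k then (1:Int) else 0 := by
  simp [eVec]

theorem length_eVec (n k : Nat) : (eVec n k).length = n := by simp [eVec]

theorem getLastD_eVec (n k : Nat) (hn : 0 < n) :
    (eVec n k).getLastD 0 = if n - 1 = k then (1:Int) else 0 := by
  have hne : eVec n k ≠ [] := by simp [eVec]; omega
  rw [List.getLastD_eq_getLast?, List.getLast?_eq_getElem?]
  rw [List.getElem?_eq_getElem (by simp [length_eVec]; omega)]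
  simp [length_eVec, getElem_eVec n k (n-1) (by omega)]

theorem dropLast_getElem_eVec (n k i : Nat) (h : i < n - 1) :
    (eVec n k).dropLast[i]'(by simp [length_eVec]; omega) = if i = k then (1:Int) else 0 := by
  rw [List.getElem_dropLast]
  exact getElem_eVec n k i (by omega)

theorem Sp_eVec (poly : List Int) (k : Nat) (hk : k < poly.length) :
    Sp poly (eVec poly.length k)
      = if k + 1 < poly.length then eVec poly.length (k+1) else tapsVec poly := by
  have hn : 0 < poly.length := by omega
  have hlen1 : (eVec poly.length k).length = poly.length := length_eVec _ _
  have hL : (Sp poly (eVec poly.length k)).length = poly.length := by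
    unfold Sp; exact length_shiftSpec poly _ 0 hlen1 hn
  have hzl : ((poly.drop 1).zip (eVec poly.length k).dropLast).length = poly.length - 1 := by
    simp [List.length_zip, List.length_dropLast, length_eVec]
  by_cases hcase : k + 1 < poly.length
  · rw [if_pos hcase]
    have hmsb : (eVec poly.length k).getLastD 0 = 0 := by
      rw [getLastD_eVec _ _ hn, if_neg (by omega)]
    apply List.ext_getElem
    · rw [hL, length_eVec]
    · intro i h1 h2
      simp only [Sp, shiftSpec, hmsb]
      rcases i with _ | j
      · simp only [List.getElem_cons_zero]
        rw [getElem_eVec _ _ 0 hn, if_neg (by omega)]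
        simp
      · have hj : j < poly.length - 1 := by rw [hL] at h1; omega
        have hgz : (((poly.drop 1).zip (eVec poly.length k).dropLast))[j]'(by omega)
            = ((poly.drop 1)[j]'(by simp; omega), (eVec poly.length k).dropLast[j]'(by simp [length_eVec]; omega)) :=
          List.getElem_zip
        simp only [List.getElem_cons_succ, List.getElem_map, hgz, dropLast_getElem_eVec _ _ _ hj]
        rw [getElem_eVec _ _ (j+1) (by omega)]
        by_cases hjk : j = k
        · simp [hjk]
        · rw [if_neg hjk, if_neg (by omega : ¬ j + 1 = k + 1)]
          split <;> simp
  · rw [if_neg hcase]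
    have hk' : poly.length - 1 = k := by omega
    have hmsb : (eVec poly.length k).getLastD 0 = 1 := by
      rw [getLastD_eVec _ _ hn, if_pos hk']
    apply List.ext_getElem
    · rw [hL, length_tapsVec poly hn]
    · intro i h1 h2
      simp only [Sp, shiftSpec, hmsb]
      rcases i with _ | j
      · simp only [List.getElem_cons_zero, tapsVec]
        simp
      · have hj : j < poly.length - 1 := by rw [hL] at h1; omega
        have hgz : (((poly.drop 1).zip (eVec poly.length k).dropLast))[j]'(by omega)
            = ((poly.drop 1)[j]'(by simp; omega), (eVec poly.length k).dropLast[j]'(by simp [length_eVec]; omega)) :=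
          List.getElem_zip
        simp only [List.getElem_cons_succ, List.getElem_map, hgz, dropLast_getElem_eVec _ _ _ hj]
        rw [if_neg (by omega : ¬ j = k)]
        have htaps : (tapsVec poly)[j+1]'(by rw [length_tapsVec poly hn]; omega)
            = if (poly.drop 1)[j]'(by simp; omega) ≠ 0 then (1:Int) else 0 := by
          simp only [tapsVec, List.getElem_cons_succ, List.getElem_map]
        rw [htaps]
        split <;> first | decide | simp

theorem spec_zeros_one (poly : List Int) (hn : 0 < poly.length) :
    shiftSpec poly (zeros poly.length) 1 = tapsVec poly := by
  unfold shiftSpec zeros tapsVec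
  obtain ⟨m, hm⟩ : ∃ m, poly.length = m + 1 := ⟨poly.length - 1, by omega⟩
  rw [hm]
  have hdl : (List.replicate (m+1) (0:Int)).dropLast = List.replicate m 0 := by
    simp [List.dropLast_replicate]
  have hlast : (List.replicate (m+1) (0:Int)).getLastD 0 = 0 := by
    simp [List.getLastD_eq_getLast?, List.getLast?_replicate]
  rw [hdl, hlast]
  congr 1
  apply List.ext_getElem
  · simp [List.length_zip, hm]
  · intro i h1 h2
    have hi : i < m := by simp [List.length_zip, hm] at h1; omega
    have hgz : (((poly.drop 1).zip (List.replicate m (0:Int))))[i]'(by simp [List.length_zip, hm]; omega)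
        = ((poly.drop 1)[i]'(by simp [hm]; omega), (List.replicate m (0:Int))[i]'(by simp; omega)) :=
      List.getElem_zip
    simp only [List.getElem_map, hgz, List.getElem_replicate]
    split <;> first | decide | simp

theorem serial_zeros_data (poly u : List Int) (d : Nat) (hlen : u.length = poly.length) (hn : 0 < poly.length) :
    lfsr_shift_serial poly u (List.replicate d 0) = (Sp poly)^[d] u := by
  induction d generalizing u with
  | zero => rfl
  | succ d ih =>
    rw [List.replicate_succ]
    unfold lfsr_shift_serial
    rw [List.foldl_cons]
    have hne : u ≠ [] := by intro h; rw [h] at hlen; simp at hlen; omega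
    rw [shift_bit_eq_shiftSpec poly u 0 hlen hne]
    rw [Function.iterate_succ_apply]
    exact ih (shiftSpec poly u 0) (length_shiftSpec poly u 0 hlen hn)

theorem iter_Sp_eVec (poly : List Int) (d i : Nat) (hi : i < poly.length) :
    (Sp poly)^[d] (eVec poly.length i)
      = if i + d < poly.length then eVec poly.length (i + d)
        else (Sp poly)^[i + d - poly.length] (tapsVec poly) := by
  induction d generalizing i with
  | zero => simp [hi]
  | succ d ih =>
    rw [Function.iterate_succ_apply, Sp_eVec poly i hi]
    by_cases hcase : i + 1 < poly.length
    · rw [if_pos hcase, ih (i+1) hcase]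
      have e1 : i + 1 + d = i + (d + 1) := by omega
      rw [e1]
    · rw [if_neg hcase]
      have hk' : i = poly.length - 1 := by omega
      have e2 : ¬ (i + (d+1) < poly.length) := by omega
      rw [if_neg e2]
      have e3 : i + (d + 1) - poly.length = d := by omega
      rw [e3]

theorem iter_Sp_zeros (poly : List Int) (hn : 0 < poly.length) (i : Nat) :
    (Sp poly)^[i] (zeros poly.length) = zeros poly.length := by
  induction i with
  | zero => rfl
  | succ i ih => rw [Function.iterate_succ_apply, Sp_zeros poly hn, ih]

theorem serial_onehot (poly : List Int) (hn : 0 < poly.length) (i m : Nat) :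
    lfsr_shift_serial poly (zeros poly.length) (List.replicate i 0 ++ 1 :: List.replicate m 0)
      = (Sp poly)^[m] (tapsVec poly) := by
  unfold lfsr_shift_serial
  rw [List.foldl_append, List.foldl_cons]
  have hpre : (List.replicate i (0:Int)).foldl (fun ns dbit => lfsr_shift_bit poly ns dbit) (zeros poly.length) = zeros poly.length := by
    have h := serial_zeros_data poly (zeros poly.length) i (by simp [zeros]) hn
    unfold lfsr_shift_serial at h
    rw [h, iter_Sp_zeros poly hn]
  rw [hpre]
  have hone : lfsr_shift_bit poly (zeros poly.length) 1 = tapsVec poly := by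
    rw [shift_bit_eq_shiftSpec poly _ 1 (by simp [zeros])
      (List.ne_nil_of_length_pos (by simp [zeros]; omega))]
    exact spec_zeros_one poly hn
  rw [hone]
  have h2 := serial_zeros_data poly (tapsVec poly) m (length_tapsVec poly hn) hn
  unfold lfsr_shift_serial at h2
  exact h2

theorem set_replicate_eVec (n i : Nat) (h : i < n) :
    (List.replicate n (0:Int)).set i 1 = eVec n i := by
  apply List.ext_getElem
  · simp [length_eVec]
  · intro j h1 h2
    rw [List.getElem_set, List.getElem_replicate, getElem_eVec n i j (by simpa using h1)]
    split <;> rename_i hji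
    · rw [if_pos hji.symm]
    · rw [if_neg (by omega)]

theorem onehot_data_decomp (d iN : Nat) (h : iN < d) :
    (List.replicate d (0:Int)).set iN 1
      = List.replicate iN 0 ++ 1 :: List.replicate (d - iN - 1) 0 := by
  rw [List.set_eq_take_append_cons_drop]
  rw [if_pos (by simpa using h)]
  simp [List.take_replicate, List.drop_replicate, Nat.min_eq_left (Nat.le_of_lt h), Nat.sub_sub]

theorem us_fold (poly : List Int) (d : Nat) :
    ∀ (acc : List (List Int)) (u : List Int),
    ((List.range d).foldl (fun (st : List (List Int) × List Int) _ => (st.1 ++ [st.2], altStep poly st.2)) (acc, u))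
      = (acc ++ (List.range d).map (fun k => (Sp poly)^[k] u), (Sp poly)^[d] u) := by
  induction d with
  | zero => intro acc u; simp
  | succ d ih =>
    intro acc u
    rw [List.range_succ, List.foldl_append, ih]
    simp only [List.foldl_cons, List.foldl_nil, List.map_append, List.map_cons, List.map_nil]
    rw [altStep_eq_shiftSpec]
    simp [Prod.ext_iff, Sp, Function.iterate_succ_apply', List.append_assoc]

theorem build_eq (poly : List Int) (dwidth : Int) (r : Bool)
    (hpre : poly ≠ [] ∨ dwidth ≤ 0) :
    build_crc_matrices poly dwidth r = build_crc_matrices_alt poly dwidth r := by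
  by_cases hn0 : poly.length = 0
  · have hp : poly = [] := List.length_eq_zero_iff.mp hn0
    have hd : dwidth ≤ 0 := hpre.resolve_left (by simp [hp])
    subst hp
    unfold build_crc_matrices build_crc_matrices_alt
    have h1 : PySem.List.pyRange 0 dwidth 1 = [] := PySem.List.pyRange_one_eq_nil (by omega)
    have h2 : (max dwidth 0).toNat = 0 := by omega
    simp [h1, h2]
  · have hn : 0 < poly.length := by omega
    unfold build_crc_matrices build_crc_matrices_alt
    dsimp only
    have hdd : (max dwidth 0).toNat = dwidth.toNat := by omega
    rw [hdd]
    rw [taps_port_eq poly (fun h => hn0 (by rw [h]; rfl))]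
    have hus : ((List.range dwidth.toNat).foldl
        (fun (st : List (List Int) × List Int) _ => (st.1 ++ [st.2], altStep poly st.2))
        ([], tapsVec poly)).1
        = (List.range dwidth.toNat).map (fun k => (Sp poly)^[k] (tapsVec poly)) := by
      rw [us_fold poly dwidth.toNat [] (tapsVec poly)]
      simp
    have hkey : (PySem.List.pyRange 0 dwidth 1).map
        (fun i => lfsr_shift_serial poly (List.replicate poly.length (0:Int))
          (PySem.List.pySetD (List.replicate dwidth.toNat (0:Int)) i 1))
        = ((List.range dwidth.toNat).map (fun k => (Sp poly)^[k] (tapsVec poly))).reverse := by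
      rw [PySem.List.pyRange_zero]
      rw [List.map_map]
      apply List.ext_getElem
      · simp
      · intro k h1 h2
        have hk : k < dwidth.toNat := by simpa using h1
        simp only [List.getElem_map, List.getElem_range, Function.comp]
        have hset : PySem.List.pySetD (List.replicate dwidth.toNat (0:Int)) ((k : Nat) : Int) 1
            = (List.replicate dwidth.toNat (0:Int)).set k 1 := by
          simp [PySem.List.pySetD_natCast]
        rw [hset, onehot_data_decomp dwidth.toNat k hk]
        rw [show (List.replicate poly.length (0:Int)) = zeros poly.length from rfl]
        rw [serial_onehot poly hn k (dwidth.toNat - k - 1)]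
        rw [List.getElem_reverse]
        simp only [List.getElem_map, List.getElem_range, List.length_map, List.length_range]
        congr 1
        omega
    congr 1
    · -- state part
      rw [PySem.List.foldl_append_singleton_eq_map
        (fun i => lfsr_shift_serial poly ((List.replicate poly.length (0:Int)).set i 1)
          (List.replicate dwidth.toNat 0)) (List.range poly.length) []]
      rw [List.nil_append, hus]
      apply List.map_congr_left
      intro i hi
      have hilt : i < poly.length := List.mem_range.mp hi
      rw [set_replicate_eVec poly.length i hilt]
      have hser := serial_zeros_data poly (eVec poly.length i) dwidth.toNat (length_eVec _ _) hn
      rw [hser, iter_Sp_eVec poly dwidth.toNat i hilt]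
      by_cases hcase : i + dwidth.toNat < poly.length
      · rw [if_pos hcase, if_pos hcase]
        rfl
      · rw [if_neg hcase, if_neg hcase]
        rw [PySem.List.getD_map_range _ _ _ _ (by omega)]
    · -- data part
      cases r with
      | false =>
        simp only [Bool.not_false, Bool.false_eq_true, if_true, if_false]
        rw [PySem.List.foldl_append_singleton_eq_map
          (fun i => lfsr_shift_serial poly (List.replicate poly.length (0:Int))
            (PySem.List.pySetD (List.replicate dwidth.toNat (0:Int)) i 1)) _ []]
        rw [List.nil_append, List.map_reverse, hkey, List.reverse_reverse, hus]
      | true =>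
        simp only [Bool.not_true, Bool.false_eq_true, if_true, if_false]
        rw [PySem.List.foldl_append_singleton_eq_map
          (fun i => lfsr_shift_serial poly (List.replicate poly.length (0:Int))
            (PySem.List.pySetD (List.replicate dwidth.toNat (0:Int)) i 1)) _ []]
        rw [List.nil_append, hkey, hus]

-- ===== VERDICT (by name: the statement is the Claim_ definition above) =====
theorem build_crc_matrices_spec : Claim_equal_build_crc_matrices := by
  intro poly dwidth reflect_input _ hpre
  unfold Spec_build_crc_matrices
  exact build_eq poly dwidth reflect_input hpre
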